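-- pv_equiv track=rewrite | github.com/LingyeSoul/SillyTavernLauncher | src/network.py | _classify_adapter
-- ===== SOURCE A (Python) =====
-- def _classify_adapter(adapter_name: str) -> tuple:
--     """
--     判断适配器类型和优先级
--
--     Args:
--         adapter_name: 适配器名称
--
--     Returns:
--         tuple: (适配器类型, 优先级数值)
--                适配器类型: 'physical' (物理网卡), 'vm' (虚拟机), 'vpn' (VPN), 'other' (其他)
--                优先级数值: 0为最高优先级
--     """
--     name_lower = adapter_name.lower()
--
--     # 虚拟机相关关键词（最低优先级）
--     vm_keywords = [
--         'vmware', 'virtualbox', 'virtual', 'vbox', 'vethernet',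
--         'hyper-v', 'vethernet', 'docker', 'wsl', 'vnc'
--     ]
--     # VPN相关关键词（次低优先级）
--     vpn_keywords = [
--         'vpn', 'tap', 'tun', 'ppp', 'pptp', 'l2tp', 'cisco',
--         'fortinet', 'openvpn', 'wireguard', 'nordvpn', 'expressvpn'
--     ]
--     # 物理网卡相关关键词（高优先级）
--     physical_keywords = [
--         'ethernet', 'realtek', 'intel', 'broadcom', 'nvidia',
--         'wi-fi', 'wireless', '802.11', 'wlan', 'wifi', 'qualcomm',
--         'atheros', 'killer', 'controller'
--     ]
--
--     # 检查是否为虚拟机适配器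
--     for keyword in vm_keywords:
--         if keyword in name_lower:
--             return ('vm', 30)  # 虚拟机最低优先级
--
--     # 检查是否为VPN适配器
--     for keyword in vpn_keywords:
--         if keyword in name_lower:
--             return ('vpn', 20)  # VPN次低优先级
--
--     # 检查是否为物理网卡
--     for keyword in physical_keywords:
--         if keyword in name_lower:
--             return ('physical', 10)  # 物理网卡最高优先级
--
--     # 默认为其他类型
--     return ('other', 25)
-- ===== SOURCE B (Python) =====
-- def _classify_adapter(adapter_name: str) -> tuple:
--     """Min-rank fold: one flat (keyword, rank) table, a single fold that keeps
--     the smallest rank whose keyword occurs in name_lower (skipping checks that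
--     cannot improve it), and a result table indexed by the final rank."""
--     name_lower = adapter_name.lower()
--
--     table = [
--         ('vmware', 0), ('virtualbox', 0), ('virtual', 0), ('vbox', 0),
--         ('vethernet', 0), ('hyper-v', 0), ('vethernet', 0), ('docker', 0),
--         ('wsl', 0), ('vnc', 0),
--         ('vpn', 1), ('tap', 1), ('tun', 1), ('ppp', 1), ('pptp', 1),
--         ('l2tp', 1), ('cisco', 1), ('fortinet', 1), ('openvpn', 1),
--         ('wireguard', 1), ('nordvpn', 1), ('expressvpn', 1),
--         ('ethernet', 2), ('realtek', 2), ('intel', 2), ('broadcom', 2),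
--         ('nvidia', 2), ('wi-fi', 2), ('wireless', 2), ('802.11', 2),
--         ('wlan', 2), ('wifi', 2), ('qualcomm', 2), ('atheros', 2),
--         ('killer', 2), ('controller', 2),
--     ]
--     results = [('vm', 30), ('vpn', 20), ('physical', 10), ('other', 25)]
--
--     best = 3
--     for keyword, rank in table:
--         if rank < best and keyword in name_lower:
--             best = rank
--     return results[best]
-- ===== Notes on version B (the rewrite author's own statement) =====
-- stated objective: alternative
-- what changed: Replaces A's three sequential early-return keyword scans by a single fold over one flat (keyword, rank) table that maintains the minimum matched rank (skipping keywords that cannot improve it), then indexes a result table by the final rank.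
import Mathlib
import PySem

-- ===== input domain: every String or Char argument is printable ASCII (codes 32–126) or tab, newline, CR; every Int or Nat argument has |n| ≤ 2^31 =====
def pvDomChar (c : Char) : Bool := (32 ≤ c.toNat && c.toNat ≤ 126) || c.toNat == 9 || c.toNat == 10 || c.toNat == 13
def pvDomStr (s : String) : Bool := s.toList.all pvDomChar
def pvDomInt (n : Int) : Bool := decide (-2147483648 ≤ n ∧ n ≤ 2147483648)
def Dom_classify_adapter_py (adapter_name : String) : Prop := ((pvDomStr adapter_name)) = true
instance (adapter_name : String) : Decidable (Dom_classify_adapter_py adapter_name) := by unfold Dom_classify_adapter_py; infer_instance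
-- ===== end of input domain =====

-- B replaces A's three sequential early-return scans by one min-rank fold over a
-- flat (keyword, rank) table plus a result table indexed by the final rank
-- (objective: alternative decomposition, same cost).

-- ===== PORT A =====
def pvVmKw : List String :=
  ["vmware", "virtualbox", "virtual", "vbox", "vethernet",
   "hyper-v", "vethernet", "docker", "wsl", "vnc"]
def pvVpnKw : List String :=
  ["vpn", "tap", "tun", "ppp", "pptp", "l2tp", "cisco",
   "fortinet", "openvpn", "wireguard", "nordvpn", "expressvpn"]
def pvPhysKw : List String :=
  ["ethernet", "realtek", "intel", "broadcom", "nvidia",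
   "wi-fi", "wireless", "802.11", "wlan", "wifi", "qualcomm",
   "atheros", "killer", "controller"]

-- 'for keyword in kws: if keyword in name_lower: return …' — early-return scan
def pvScan : List String → String → Bool
  | [], _ => false
  | k :: rest, nl => if PySem.Str.isIn k nl then true else pvScan rest nl

def classify_adapter_py (adapter_name : String) : String × Int :=
  let name_lower := PySem.Str.lower adapter_name
  if pvScan pvVmKw name_lower then ("vm", 30)
  else if pvScan pvVpnKw name_lower then ("vpn", 20)
  else if pvScan pvPhysKw name_lower then ("physical", 10)
  else ("other", 25)

-- ===== PORT B =====
-- the flat (keyword, rank) table, exactly as listed in Source B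
def pvTableB : List (String × Nat) :=
  [("vmware", 0), ("virtualbox", 0), ("virtual", 0), ("vbox", 0),
   ("vethernet", 0), ("hyper-v", 0), ("vethernet", 0), ("docker", 0),
   ("wsl", 0), ("vnc", 0),
   ("vpn", 1), ("tap", 1), ("tun", 1), ("ppp", 1), ("pptp", 1),
   ("l2tp", 1), ("cisco", 1), ("fortinet", 1), ("openvpn", 1),
   ("wireguard", 1), ("nordvpn", 1), ("expressvpn", 1),
   ("ethernet", 2), ("realtek", 2), ("intel", 2), ("broadcom", 2),
   ("nvidia", 2), ("wi-fi", 2), ("wireless", 2), ("802.11", 2),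
   ("wlan", 2), ("wifi", 2), ("qualcomm", 2), ("atheros", 2),
   ("killer", 2), ("controller", 2)]

def pvResults : List (String × Int) :=
  [("vm", 30), ("vpn", 20), ("physical", 10), ("other", 25)]

-- 'best = 3; for keyword, rank in table: if rank < best and keyword in name_lower: best = rank'
def pvBestFold (nl : String) (b : Nat) (l : List (String × Nat)) : Nat :=
  l.foldl (fun best p => if decide (p.2 < best) && PySem.Str.isIn p.1 nl then p.2 else best) b

def classify_adapter_py_alt (adapter_name : String) : String × Int :=
  let name_lower := PySem.Str.lower adapter_name
  let best := pvBestFold name_lower 3 pvTableB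
  -- 'results[best]': best ≤ 3 always, so Python's indexing is in range; getD is exact here
  pvResults.getD best ("other", 25)

-- ===== PRECONDITION & SPEC =====
def Spec_classify_adapter_py (adapter_name : String) (out : String × Int) : Prop := out = classify_adapter_py_alt adapter_name
instance (adapter_name : String) (out : String × Int) : Decidable (Spec_classify_adapter_py adapter_name out) := by unfold Spec_classify_adapter_py; infer_instance

-- ===== CLAIM (what is proved, stated in full; the proofs are below) =====
def Claim_equal_classify_adapter_py : Prop := ∀ (adapter_name : String), Dom_classify_adapter_py adapter_name → Spec_classify_adapter_py adapter_name (classify_adapter_py adapter_name)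

-- ===== LEMMAS AND PROOFS =====

-- A's early-return scan is List.any
lemma pvScan_eq_any (kws : List String) (nl : String) :
    pvScan kws nl = kws.any (fun k => PySem.Str.isIn k nl) := by
  induction kws with
  | nil => rfl
  | cons k t ih => simp [pvScan, ih, Bool.if_true_left]

-- the fold splits over list concatenation
lemma pvBestFold_append (nl : String) (b : Nat) (l1 l2 : List (String × Nat)) :
    pvBestFold nl b (l1 ++ l2) = pvBestFold nl (pvBestFold nl b l1) l2 := by
  simp [pvBestFold]

-- on a constant-rank segment, the fold is 'drop to r iff r < b and some keyword matches'
lemma pvBestFold_const (nl : String) (ks : List String) (r b : Nat) :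
    pvBestFold nl b (ks.map (fun k => (k, r)))
      = if r < b ∧ ks.any (fun k => PySem.Str.isIn k nl) then r else b := by
  induction ks generalizing b with
  | nil => simp [pvBestFold]
  | cons k t ih =>
    simp only [List.map_cons, pvBestFold, List.foldl_cons, List.any_cons] at ih ⊢
    by_cases hin : PySem.Str.isIn k nl = true
    · simp only [hin, Bool.and_true, Bool.true_or]
      by_cases hlt : r < b
      · rw [if_pos (by simp [hlt]), ih,
            if_neg (fun h => absurd h.1 (Nat.lt_irrefl r)),
            if_pos ⟨hlt, trivial⟩]
      · rw [if_neg (by simp [hlt]), ih,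
            if_neg (fun h => hlt h.1), if_neg (fun h => hlt h.1)]
    · simp only [Bool.eq_false_iff.mpr hin, Bool.and_false, Bool.false_or]
      rw [if_neg (by simp), ih]

-- B's table is the three keyword groups with ranks 0, 1, 2
lemma pvTableB_eq :
    pvTableB = pvVmKw.map (fun k => (k, 0))
      ++ (pvVpnKw.map (fun k => (k, 1)) ++ pvPhysKw.map (fun k => (k, 2))) := by
  rfl

-- ===== VERDICT (by name: the statement is the Claim_ definition above) =====
theorem classify_adapter_py_spec : Claim_equal_classify_adapter_py := by
  intro a _
  unfold Spec_classify_adapter_py classify_adapter_py classify_adapter_py_alt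
  simp only [pvTableB_eq, pvBestFold_append, pvBestFold_const, pvScan_eq_any]
  cases h0 : pvVmKw.any (fun k => PySem.Str.isIn k (PySem.Str.lower a)) <;>
  cases h1 : pvVpnKw.any (fun k => PySem.Str.isIn k (PySem.Str.lower a)) <;>
  cases h2 : pvPhysKw.any (fun k => PySem.Str.isIn k (PySem.Str.lower a)) <;>
    decide
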